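-- pv_equiv track=rewrite | github.com/Zombinator85/SentientOS | sentientos/meta/reflection_loop.py | _planning_inefficiencies
-- ===== SOURCE A (Python) =====
-- from typing import Callable, Iterable, Mapping, Sequence
--
-- def _planning_inefficiencies(
--
--     digests: Sequence[Mapping[str, object]],
--     patches: Sequence[Mapping[str, object]],
-- ) -> list[str]:
--     inefficiencies: list[str] = []
--     for digest in digests:
--         if digest.get("delays"):
--             inefficiencies.append("delayed_deliverables")
--         if digest.get("blocked"):
--             inefficiencies.append("blocked_tasks")
--     for patch in patches:
--         if patch.get("reverts", 0):
--             inefficiencies.append("rework_detected")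
--     return sorted(set(inefficiencies))
-- ===== SOURCE B (Python) =====
-- def _planning_inefficiencies(digests, patches):
--     result: list[str] = []
--     if any(d.get("blocked") for d in digests):
--         result.append("blocked_tasks")
--     if any(d.get("delays") for d in digests):
--         result.append("delayed_deliverables")
--     if any(p.get("reverts", 0) for p in patches):
--         result.append("rework_detected")
--     return result
-- ===== Notes on version B (the rewrite author's own statement) =====
-- stated objective: simpler
-- what changed: Replaces accumulate-duplicates-then-sorted(set) with three independent any() existence checks that append the labels directly in their sorted order, with no set and no sort.
import Mathlib
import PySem

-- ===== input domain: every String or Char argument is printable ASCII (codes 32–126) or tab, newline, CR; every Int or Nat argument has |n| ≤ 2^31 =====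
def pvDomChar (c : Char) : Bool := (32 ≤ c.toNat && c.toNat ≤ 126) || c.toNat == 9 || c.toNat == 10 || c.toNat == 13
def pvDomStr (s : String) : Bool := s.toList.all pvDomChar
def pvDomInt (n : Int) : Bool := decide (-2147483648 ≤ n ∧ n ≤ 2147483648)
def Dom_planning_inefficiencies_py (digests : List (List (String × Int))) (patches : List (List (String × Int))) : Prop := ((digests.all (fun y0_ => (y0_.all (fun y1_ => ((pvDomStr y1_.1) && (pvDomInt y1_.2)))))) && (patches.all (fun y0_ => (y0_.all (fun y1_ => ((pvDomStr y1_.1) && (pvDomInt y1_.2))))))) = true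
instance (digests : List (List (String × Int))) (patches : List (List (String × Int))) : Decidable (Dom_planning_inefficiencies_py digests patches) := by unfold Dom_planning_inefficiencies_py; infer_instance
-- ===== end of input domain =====

-- ===== PORT A =====
-- B replaces A's accumulate-duplicates-then-sorted(set) with three any() existence checks
-- appending the labels directly in sorted order (objective: simpler).
-- Python truthiness of digest.get(k) / patch.get(k, 0): none and 0 are falsy.
def pyTruthy (o : Option Int) : Bool := o.getD 0 != 0

def planning_inefficiencies_py (digests : List (List (String × Int))) (patches : List (List (String × Int))) : List String :=
  let ineff1 : List String := digests.foldl (fun acc digest =>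
    let acc := if pyTruthy ((PySem.Dict.mk digest).get? "delays") then acc ++ ["delayed_deliverables"] else acc
    if pyTruthy ((PySem.Dict.mk digest).get? "blocked") then acc ++ ["blocked_tasks"] else acc) []
  let ineff2 : List String := patches.foldl (fun acc patch =>
    if (PySem.Dict.mk patch).getD "reverts" 0 != 0 then acc ++ ["rework_detected"] else acc) ineff1
  PySem.List.sorted (PySem.Set.ofList ineff2) (fun x => x) false

-- ===== PORT B =====
def planning_inefficiencies_py_alt (digests : List (List (String × Int))) (patches : List (List (String × Int))) : List String :=
  (if digests.any (fun d => pyTruthy ((PySem.Dict.mk d).get? "blocked")) then ["blocked_tasks"] else []) ++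
  (if digests.any (fun d => pyTruthy ((PySem.Dict.mk d).get? "delays")) then ["delayed_deliverables"] else []) ++
  (if patches.any (fun p => (PySem.Dict.mk p).getD "reverts" 0 != 0) then ["rework_detected"] else [])

-- ===== PRECONDITION & SPEC =====
def Spec_planning_inefficiencies_py (digests : List (List (String × Int))) (patches : List (List (String × Int))) (out : List String) : Prop := out = planning_inefficiencies_py_alt digests patches
instance (digests : List (List (String × Int))) (patches : List (List (String × Int))) (out : List String) : Decidable (Spec_planning_inefficiencies_py digests patches out) := by unfold Spec_planning_inefficiencies_py; infer_instance

-- ===== CLAIM (what is proved, stated in full; the proofs are below) =====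
def Claim_equal_planning_inefficiencies_py : Prop := ∀ (digests : List (List (String × Int))) (patches : List (List (String × Int))), Dom_planning_inefficiencies_py digests patches → Spec_planning_inefficiencies_py digests patches (planning_inefficiencies_py digests patches)

-- ===== LEMMAS AND PROOFS =====
-- membership in A's accumulated list after the digests loop
theorem mem_foldD (digests : List (List (String × Int))) (acc : List String) (x : String) :
    x ∈ digests.foldl (fun acc digest =>
      let acc := if pyTruthy ((PySem.Dict.mk digest).get? "delays") then acc ++ ["delayed_deliverables"] else acc
      if pyTruthy ((PySem.Dict.mk digest).get? "blocked") then acc ++ ["blocked_tasks"] else acc) acc ↔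
    x ∈ acc ∨ (x = "delayed_deliverables" ∧ digests.any (fun d => pyTruthy ((PySem.Dict.mk d).get? "delays")))
            ∨ (x = "blocked_tasks" ∧ digests.any (fun d => pyTruthy ((PySem.Dict.mk d).get? "blocked"))) := by
  induction digests generalizing acc with
  | nil => simp
  | cons d ds ih =>
    simp only [List.foldl_cons, List.any_cons, ih]
    by_cases h1 : pyTruthy ((PySem.Dict.mk d).get? "delays") <;>
      by_cases h2 : pyTruthy ((PySem.Dict.mk d).get? "blocked") <;>
        simp only [h1, h2, if_true, if_false, Bool.false_eq_true, List.mem_append, List.mem_singleton] <;> tauto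

theorem mem_foldP (patches : List (List (String × Int))) (acc : List String) (x : String) :
    x ∈ patches.foldl (fun acc patch =>
      if (PySem.Dict.mk patch).getD "reverts" 0 != 0 then acc ++ ["rework_detected"] else acc) acc ↔
    x ∈ acc ∨ (x = "rework_detected" ∧ patches.any (fun p => (PySem.Dict.mk p).getD "reverts" 0 != 0)) := by
  induction patches generalizing acc with
  | nil => simp
  | cons p ps ih =>
    simp only [List.foldl_cons, List.any_cons, ih]
    by_cases h : (PySem.Dict.mk p).getD "reverts" 0 != 0 <;>
      simp only [h, if_true, if_false, Bool.false_eq_true, List.mem_append, List.mem_singleton] <;> tauto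

-- ===== VERDICT (by name: the statement is the Claim_ definition above) =====
theorem planning_inefficiencies_py_spec : Claim_equal_planning_inefficiencies_py := by
  intro digests patches _
  unfold Spec_planning_inefficiencies_py planning_inefficiencies_py planning_inefficiencies_py_alt
  simp only
  cases hb : digests.any (fun d => pyTruthy ((PySem.Dict.mk d).get? "blocked")) <;>
    cases hd : digests.any (fun d => pyTruthy ((PySem.Dict.mk d).get? "delays")) <;>
      cases hr : patches.any (fun p => (PySem.Dict.mk p).getD "reverts" 0 != 0) <;>
  · apply PySem.List.sorted_eq_of_perm_of_pairwise_lt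
    · rw [(List.perm_ext_iff_of_nodup ?_ ?_)]
      · intro x
        rw [PySem.Set.mem_ofList, mem_foldP, mem_foldD, hb, hd, hr]
        simp <;> tauto
      · decide
      · exact PySem.Set.nodup_ofList _
    · simp [List.pairwise_cons] <;> decide
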